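-- pv_equiv track=rewrite | github.com/sarbeshtiwari/arc-agi-3 | environment_files/rd01/rd01.py | _tile_curve
-- ===== SOURCE A (Python) =====
-- C_CURVE_TR = 4
--
-- C_CURVE_TL = 5
--
-- C_CURVE_BR = 6
--
-- C_CURVE_BL = 7
--
-- def _make_tile(color, size):
--     return [[color] * size for _ in range(size)]
--
-- def _tile_curve(bg, track_c, size, ctype):
--     t = _make_tile(bg, size)
--     mid = size // 2
--     if size >= 3:
--         if ctype == C_CURVE_TR:
--             for i in range(mid, size):
--                 t[mid][i] = track_c
--             for i in range(mid + 1):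
--                 t[i][mid] = track_c
--         elif ctype == C_CURVE_TL:
--             for i in range(mid + 1):
--                 t[mid][i] = track_c
--             for i in range(mid + 1):
--                 t[i][mid] = track_c
--         elif ctype == C_CURVE_BR:
--             for i in range(mid, size):
--                 t[mid][i] = track_c
--             for i in range(mid, size):
--                 t[i][mid] = track_c
--         elif ctype == C_CURVE_BL:
--             for i in range(mid + 1):
--                 t[mid][i] = track_c
--             for i in range(mid, size):
--                 t[i][mid] = track_c
--     return t
-- ===== SOURCE B (Python) =====
-- C_CURVE_TR = 4
-- C_CURVE_TL = 5
-- C_CURVE_BR = 6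
-- C_CURVE_BL = 7
--
-- def _tile_curve(bg, track_c, size, ctype):
--     mid = size // 2
--     curve = size >= 3 and ctype in (C_CURVE_TR, C_CURVE_TL, C_CURVE_BR, C_CURVE_BL)
--     rightward = ctype in (C_CURVE_TR, C_CURVE_BR)
--     downward = ctype in (C_CURVE_BR, C_CURVE_BL)
--     return [[track_c if curve and ((r == mid and (mid <= c if rightward else c <= mid))
--                                    or (c == mid and (mid <= r if downward else r <= mid)))
--              else bg
--              for c in range(size)]
--             for r in range(size)]
-- ===== Notes on version B (the rewrite author's own statement) =====
-- stated objective: simpler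
-- what changed: B replaces A's build-then-mutate structure (background tile plus a four-way ctype branch with duplicated half-row/half-column write loops) by a single nested comprehension that computes every cell directly from a closed-form predicate derived from ctype (rightward/downward flags).
import Mathlib
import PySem

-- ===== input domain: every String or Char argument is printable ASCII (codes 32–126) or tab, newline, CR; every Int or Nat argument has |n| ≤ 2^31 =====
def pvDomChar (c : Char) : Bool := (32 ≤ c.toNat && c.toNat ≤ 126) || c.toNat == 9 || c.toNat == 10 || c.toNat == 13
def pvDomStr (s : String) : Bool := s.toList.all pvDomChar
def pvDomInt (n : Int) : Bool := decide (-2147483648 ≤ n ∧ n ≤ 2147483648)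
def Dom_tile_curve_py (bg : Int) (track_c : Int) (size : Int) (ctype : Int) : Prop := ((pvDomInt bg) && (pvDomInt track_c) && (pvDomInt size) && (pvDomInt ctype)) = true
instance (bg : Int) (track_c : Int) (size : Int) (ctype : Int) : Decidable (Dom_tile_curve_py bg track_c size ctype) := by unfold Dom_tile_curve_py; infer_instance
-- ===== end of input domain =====

-- B replaces A's four-way branch with duplicated mutation loops by one nested
-- comprehension computing each cell from a closed-form predicate (simpler; same asymptotic cost).

-- ===== PORT A =====
-- Python 't[r][c] = v'; exact for the nonnegative in-range indices these ports use
def pvSetCell (t : List (List Int)) (r : Int) (c : Int) (v : Int) : List (List Int) :=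
  t.set r.toNat ((t.getD r.toNat []).set c.toNat v)

-- [[color] * size for _ in range(size)]  ([x]*size = replicate, empty for size ≤ 0)
def pvMakeTile (color : Int) (size : Int) : List (List Int) :=
  (PySem.List.pyRange 0 size 1).map (fun _ => List.replicate size.toNat color)

def tile_curve_py (bg : Int) (track_c : Int) (size : Int) (ctype : Int) : List (List Int) :=
  let t := pvMakeTile bg size
  let mid := PySem.Int.floordiv size 2
  if 3 ≤ size then
    if ctype = 4 then
      let t := (PySem.List.pyRange mid size 1).foldl (fun t i => pvSetCell t mid i track_c) t
      (PySem.List.pyRange 0 (mid+1) 1).foldl (fun t i => pvSetCell t i mid track_c) t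
    else if ctype = 5 then
      let t := (PySem.List.pyRange 0 (mid+1) 1).foldl (fun t i => pvSetCell t mid i track_c) t
      (PySem.List.pyRange 0 (mid+1) 1).foldl (fun t i => pvSetCell t i mid track_c) t
    else if ctype = 6 then
      let t := (PySem.List.pyRange mid size 1).foldl (fun t i => pvSetCell t mid i track_c) t
      (PySem.List.pyRange mid size 1).foldl (fun t i => pvSetCell t i mid track_c) t
    else if ctype = 7 then
      let t := (PySem.List.pyRange 0 (mid+1) 1).foldl (fun t i => pvSetCell t mid i track_c) t
      (PySem.List.pyRange mid size 1).foldl (fun t i => pvSetCell t i mid track_c) t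
    else t
  else t

-- ===== PORT B =====
def tile_curve_py_alt (bg : Int) (track_c : Int) (size : Int) (ctype : Int) : List (List Int) :=
  let mid := PySem.Int.floordiv size 2
  (PySem.List.pyRange 0 size 1).map (fun r =>
    (PySem.List.pyRange 0 size 1).map (fun c =>
      if (3 ≤ size ∧ (ctype = 4 ∨ ctype = 5 ∨ ctype = 6 ∨ ctype = 7)) ∧
         ((r = mid ∧ (if ctype = 4 ∨ ctype = 6 then mid ≤ c else c ≤ mid)) ∨
          (c = mid ∧ (if ctype = 6 ∨ ctype = 7 then mid ≤ r else r ≤ mid)))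
      then track_c else bg))

-- ===== PRECONDITION & SPEC =====
def Spec_tile_curve_py (bg : Int) (track_c : Int) (size : Int) (ctype : Int) (out : List (List Int)) : Prop := out = tile_curve_py_alt bg track_c size ctype
instance (bg : Int) (track_c : Int) (size : Int) (ctype : Int) (out : List (List Int)) : Decidable (Spec_tile_curve_py bg track_c size ctype out) := by unfold Spec_tile_curve_py; infer_instance

-- ===== CLAIM (what is proved, stated in full; the proofs are below) =====
def Claim_equal_tile_curve_py : Prop := ∀ (bg : Int) (track_c : Int) (size : Int) (ctype : Int), Dom_tile_curve_py bg track_c size ctype → Spec_tile_curve_py bg track_c size ctype (tile_curve_py bg track_c size ctype)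

-- ===== LEMMAS AND PROOFS =====

theorem pvSetCell_length (t : List (List Int)) (r c v : Int) :
    (pvSetCell t r c v).length = t.length := by
  simp [pvSetCell]

-- row-fill loop: all writes go to row m
theorem rowfold_get (v m : Int) : ∀ (l : List Int) (t : List (List Int)) (r : Nat),
    (l.foldl (fun t i => pvSetCell t m i v) t)[r]? =
      if r = m.toNat ∧ r < t.length then
        (t[r]?).map (fun row => l.foldl (fun row i => row.set i.toNat v) row)
      else t[r]?
  | [], t, r => by
      simp only [List.foldl_nil]
      split
      · rename_i h
        obtain ⟨_, hr⟩ := h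
        simp [List.getElem?_eq_getElem hr]
      · rfl
  | i :: l, t, r => by
      rw [List.foldl_cons, rowfold_get v m l]
      have hl : (pvSetCell t m i v).length = t.length := pvSetCell_length ..
      by_cases hr : r < t.length
      · by_cases hm : r = m.toNat
        · have hset : (pvSetCell t m i v)[r]? = some ((t[r]'hr).set i.toNat v) := by
            simp [pvSetCell, List.getElem?_set, ← hm, hr, List.getD,
              List.getElem?_eq_getElem hr]
          have hget : (pvSetCell t m i v)[r]'(hl ▸ hr) = (t[r]'hr).set i.toNat v := by
            have h2 := hset
            rw [List.getElem?_eq_getElem (hl ▸ hr)] at h2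
            exact Option.some.inj h2
          simp [hl, hr, ← hm, hset, hget]
        · have hset : (pvSetCell t m i v)[r]? = t[r]? := by
            simp [pvSetCell, List.getElem?_set, Ne.symm hm]
          simp [hl, hm, hset]
      · have hset : (pvSetCell t m i v)[r]? = t[r]? := by
          rw [List.getElem?_eq_none (by omega), List.getElem?_eq_none (by omega)]
        simp [hl, hr, hset]

-- column-fill loop: each step writes cell m of row i
theorem colfold_get (v m : Int) : ∀ (l : List Int) (t : List (List Int)) (r : Nat),
    (∀ i ∈ l, 0 ≤ i) →
    (l.foldl (fun t i => pvSetCell t i m v) t)[r]? =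
      if (r : Int) ∈ l ∧ r < t.length then
        (t[r]?).map (fun row => row.set m.toNat v)
      else t[r]?
  | [], t, r, _ => by simp
  | i :: l, t, r, hnn => by
      have hi : 0 ≤ i := hnn i (by simp)
      rw [List.foldl_cons, colfold_get v m l _ _ (fun j hj => hnn j (by simp [hj]))]
      have hl : (pvSetCell t i m v).length = t.length := pvSetCell_length ..
      by_cases hr : r < t.length
      · by_cases hm : (r : Int) = i
        · have hri : r = i.toNat := by omega
          have hset : (pvSetCell t i m v)[r]? = some ((t[r]'hr).set m.toNat v) := by
            simp [pvSetCell, List.getElem?_set, ← hri, hr, List.getD,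
              List.getElem?_eq_getElem hr]
          have hget : (pvSetCell t i m v)[r]'(hl ▸ hr) = (t[r]'hr).set m.toNat v := by
            have h2 := hset
            rw [List.getElem?_eq_getElem (hl ▸ hr)] at h2
            exact Option.some.inj h2
          rw [← hm] at hset
          by_cases hmem : (r : Int) ∈ l <;>
            simp [hl, hr, ← hm, hset, hmem, List.set_set, List.getElem?_eq_getElem hr]
        · have hne : r ≠ i.toNat := by omega
          have hset : (pvSetCell t i m v)[r]? = t[r]? := by
            simp [pvSetCell, List.getElem?_set, Ne.symm hne]
          simp [hl, hm, hset]
      · have hset : (pvSetCell t i m v)[r]? = t[r]? := by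
          rw [List.getElem?_eq_none (by omega), List.getElem?_eq_none (by omega)]
        simp [hl, hr, hset]

-- the inner row loop
theorem rowfill_get (v : Int) : ∀ (l : List Int) (row : List Int) (c : Nat),
    (∀ i ∈ l, 0 ≤ i) →
    (l.foldl (fun row i => row.set i.toNat v) row)[c]? =
      if (c : Int) ∈ l ∧ c < row.length then some v else row[c]?
  | [], row, c, _ => by simp
  | i :: l, row, c, hnn => by
      have hi : 0 ≤ i := hnn i (by simp)
      rw [List.foldl_cons, rowfill_get v l _ _ (fun j hj => hnn j (by simp [hj]))]
      by_cases hc : c < row.length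
      · by_cases hm : (c : Int) = i
        · have hci : c = i.toNat := by omega
          by_cases hmem : (c : Int) ∈ l <;>
            simp [hc, hm, hmem, ← hci, List.getElem?_set]
        · have hne : c ≠ i.toNat := by omega
          simp [hc, hm, List.getElem?_set, Ne.symm hne]
      · have hset : (row.set i.toNat v)[c]? = row[c]? := by
          rw [List.getElem?_eq_none (by simp; omega), List.getElem?_eq_none (by omega)]
        simp [hc, hset]

theorem rowfill_length (v : Int) (l : List Int) (row : List Int) :
    (l.foldl (fun row i => row.set i.toNat v) row).length = row.length := by
  induction l generalizing row with
  | nil => rfl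
  | cons i l ih => rw [List.foldl_cons, ih, List.length_set]

theorem rowfold_length (v m : Int) (l : List Int) (t : List (List Int)) :
    (l.foldl (fun t i => pvSetCell t m i v) t).length = t.length := by
  induction l generalizing t with
  | nil => rfl
  | cons i l ih => rw [List.foldl_cons, ih]; exact pvSetCell_length ..

theorem pvMakeTile_eq (c s : Int) :
    pvMakeTile c s = List.replicate s.toNat (List.replicate s.toNat c) := by
  simp [pvMakeTile, PySem.List.pyRange_one, List.map_map, Function.comp_def, List.map_const']

theorem map_range_get {α : Type} (f : Nat → α) (n : Nat) (r : Nat) :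
    ((List.range n).map f)[r]? = if r < n then some (f r) else none := by
  rcases Nat.lt_or_ge r n with h | h
  · rw [if_pos h, List.getElem?_eq_getElem (by simpa using h)]
    simp
  · rw [if_neg (by omega), List.getElem?_eq_none (by simpa using h)]

-- common normal form of one curve branch of A
theorem master (bg v m : Int) (n : Nat) (a1 b1 a2 b2 : Int)
    (hm0 : 0 ≤ m) (ha1 : 0 ≤ a1) (ha2 : 0 ≤ a2) :
    (PySem.List.pyRange a2 b2 1).foldl (fun t i => pvSetCell t i m v)
      ((PySem.List.pyRange a1 b1 1).foldl (fun t i => pvSetCell t m i v)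
        (List.replicate n (List.replicate n bg)))
    = (List.range n).map (fun (r : Nat) => (List.range n).map (fun (c : Nat) =>
        if ((r : Int) = m ∧ a1 ≤ (c : Int) ∧ (c : Int) < b1) ∨
           ((c : Int) = m ∧ a2 ≤ (r : Int) ∧ (r : Int) < b2)
        then v else bg)) := by
  apply List.ext_getElem?
  intro r
  rw [colfold_get v m _ _ _ (fun i hi => by
        rw [PySem.List.mem_pyRange_one] at hi; omega),
      rowfold_get v m, map_range_get]
  simp only [rowfold_length, List.length_replicate, List.getElem?_replicate,
    PySem.List.mem_pyRange_one]
  by_cases hr : r < n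
  · rw [if_pos hr]
    simp only [hr, if_true, and_true, Option.map_some]
    by_cases h2 : a2 ≤ (r : Int) ∧ (r : Int) < b2
    · rw [if_pos h2]
      by_cases hrm : r = m.toNat
      · rw [if_pos hrm]
        try simp only [Option.map_some]
        refine congrArg some ?_
        apply List.ext_getElem?
        intro c
        rw [map_range_get]
        try simp only [Option.map_some]
        try simp only [List.getElem?_set, rowfill_length, List.length_replicate, List.length_set]
        try rw [rowfill_get v _ _ _ (fun i hi => by
              rw [PySem.List.mem_pyRange_one] at hi; omega)]
        try simp only [PySem.List.mem_pyRange_one, List.length_replicate, List.getElem?_replicate,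
          rowfill_length]
        split_ifs <;> first | rfl | omega
      · rw [if_neg hrm]
        try simp only [Option.map_some]
        refine congrArg some ?_
        apply List.ext_getElem?
        intro c
        rw [map_range_get]
        try simp only [Option.map_some]
        try simp only [List.getElem?_set, rowfill_length, List.length_replicate, List.length_set]
        try rw [rowfill_get v _ _ _ (fun i hi => by
              rw [PySem.List.mem_pyRange_one] at hi; omega)]
        try simp only [PySem.List.mem_pyRange_one, List.length_replicate, List.getElem?_replicate,
          rowfill_length]
        split_ifs <;> first | rfl | omega
    · rw [if_neg h2]
      by_cases hrm : r = m.toNat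
      · rw [if_pos hrm]
        try simp only [Option.map_some]
        refine congrArg some ?_
        apply List.ext_getElem?
        intro c
        rw [map_range_get]
        try simp only [Option.map_some]
        try simp only [List.getElem?_set, rowfill_length, List.length_replicate, List.length_set]
        try rw [rowfill_get v _ _ _ (fun i hi => by
              rw [PySem.List.mem_pyRange_one] at hi; omega)]
        try simp only [PySem.List.mem_pyRange_one, List.length_replicate, List.getElem?_replicate,
          rowfill_length]
        split_ifs <;> first | rfl | omega
      · rw [if_neg hrm]
        refine congrArg some ?_
        apply List.ext_getElem?
        intro c
        rw [map_range_get]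
        try simp only [Option.map_some]
        try simp only [List.getElem?_set, rowfill_length, List.length_replicate, List.length_set]
        try rw [rowfill_get v _ _ _ (fun i hi => by
              rw [PySem.List.mem_pyRange_one] at hi; omega)]
        try simp only [PySem.List.mem_pyRange_one, List.length_replicate, List.getElem?_replicate,
          rowfill_length]
        split_ifs <;> first | rfl | omega
  · rw [if_neg hr]
    simp [hr]

-- B in range-n normal form
theorem alt_normal (bg v size ctype : Int) :
    tile_curve_py_alt bg v size ctype
    = (List.range size.toNat).map (fun (r : Nat) => (List.range size.toNat).map (fun (c : Nat) =>
        if (3 ≤ size ∧ (ctype = 4 ∨ ctype = 5 ∨ ctype = 6 ∨ ctype = 7)) ∧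
           (((r : Int) = PySem.Int.floordiv size 2 ∧
              (if ctype = 4 ∨ ctype = 6 then PySem.Int.floordiv size 2 ≤ (c : Int)
               else (c : Int) ≤ PySem.Int.floordiv size 2)) ∨
            ((c : Int) = PySem.Int.floordiv size 2 ∧
              (if ctype = 6 ∨ ctype = 7 then PySem.Int.floordiv size 2 ≤ (r : Int)
               else (r : Int) ≤ PySem.Int.floordiv size 2)))
        then v else bg)) := by
  simp [tile_curve_py_alt, PySem.List.pyRange_one, List.map_map, Function.comp_def]

-- ===== VERDICT (by name: the statement is the Claim_ definition above) =====
theorem tile_curve_py_spec : Claim_equal_tile_curve_py := by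
  intro bg v size ctype _
  unfold Spec_tile_curve_py
  rw [alt_normal]
  by_cases hs : 3 ≤ size
  · have hm : PySem.Int.floordiv size 2 = size / 2 :=
      PySem.Int.floordiv_eq_ediv_of_pos (by omega)
    have hm0 : 0 ≤ PySem.Int.floordiv size 2 := by omega
    set m := PySem.Int.floordiv size 2 with hmdef
    by_cases h4 : ctype = 4
    · subst h4
      have hA : tile_curve_py bg v size 4 =
          (PySem.List.pyRange 0 (m+1) 1).foldl (fun t i => pvSetCell t i m v)
            ((PySem.List.pyRange m size 1).foldl (fun t i => pvSetCell t m i v)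
              (pvMakeTile bg size)) := by
        simp [tile_curve_py, hs, hm]
      rw [hA, pvMakeTile_eq, master bg v m size.toNat m size 0 (m+1) hm0 hm0 le_rfl]
      apply List.map_congr_left; intro r hr
      apply List.map_congr_left; intro c hc
      rw [List.mem_range] at hr hc
      apply if_congr ?_ rfl rfl
      rw [if_pos (by norm_num), if_neg (by norm_num)]
      omega
    · by_cases h5 : ctype = 5
      · subst h5
        have hA : tile_curve_py bg v size 5 =
            (PySem.List.pyRange 0 (m+1) 1).foldl (fun t i => pvSetCell t i m v)
              ((PySem.List.pyRange 0 (m+1) 1).foldl (fun t i => pvSetCell t m i v)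
                (pvMakeTile bg size)) := by
          simp [tile_curve_py, hs, hm]
        rw [hA, pvMakeTile_eq, master bg v m size.toNat 0 (m+1) 0 (m+1) hm0 le_rfl le_rfl]
        apply List.map_congr_left; intro r hr
        apply List.map_congr_left; intro c hc
        rw [List.mem_range] at hr hc
        apply if_congr ?_ rfl rfl
        rw [if_neg (by norm_num), if_neg (by norm_num)]
        omega
      · by_cases h6 : ctype = 6
        · subst h6
          have hA : tile_curve_py bg v size 6 =
              (PySem.List.pyRange m size 1).foldl (fun t i => pvSetCell t i m v)
                ((PySem.List.pyRange m size 1).foldl (fun t i => pvSetCell t m i v)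
                  (pvMakeTile bg size)) := by
            simp [tile_curve_py, hs, hm]
          rw [hA, pvMakeTile_eq, master bg v m size.toNat m size m size hm0 hm0 hm0]
          apply List.map_congr_left; intro r hr
          apply List.map_congr_left; intro c hc
          rw [List.mem_range] at hr hc
          apply if_congr ?_ rfl rfl
          rw [if_pos (by norm_num), if_pos (by norm_num)]
          omega
        · by_cases h7 : ctype = 7
          · subst h7
            have hA : tile_curve_py bg v size 7 =
                (PySem.List.pyRange m size 1).foldl (fun t i => pvSetCell t i m v)
                  ((PySem.List.pyRange 0 (m+1) 1).foldl (fun t i => pvSetCell t m i v)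
                    (pvMakeTile bg size)) := by
              simp [tile_curve_py, hs, hm]
            rw [hA, pvMakeTile_eq, master bg v m size.toNat 0 (m+1) m size hm0 le_rfl hm0]
            apply List.map_congr_left; intro r hr
            apply List.map_congr_left; intro c hc
            rw [List.mem_range] at hr hc
            apply if_congr ?_ rfl rfl
            rw [if_neg (by norm_num), if_pos (by norm_num)]
            omega
          · have hA : tile_curve_py bg v size ctype = pvMakeTile bg size := by
              simp [tile_curve_py, hs, h4, h5, h6, h7]
            rw [hA, pvMakeTile_eq]
            apply List.ext_getElem?
            intro r
            rw [map_range_get, List.getElem?_replicate]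
            split_ifs with hr <;>
            first
              | rfl
              | (refine congrArg some ?_
                 apply List.ext_getElem?
                 intro c
                 rw [map_range_get, List.getElem?_replicate]
                 split_ifs <;> first | rfl | (exfalso; tauto))
  · have hA : tile_curve_py bg v size ctype = pvMakeTile bg size := by
      simp [tile_curve_py, hs]
    rw [hA, pvMakeTile_eq]
    apply List.ext_getElem?
    intro r
    rw [map_range_get, List.getElem?_replicate]
    split_ifs with hr <;>
    first
      | rfl
      | (refine congrArg some ?_
         apply List.ext_getElem?
         intro c
         rw [map_range_get, List.getElem?_replicate]
         split_ifs <;> first | rfl | (exfalso; tauto))
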